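-- pv_equiv track=rewrite | github.com/animeshokhade/dsa | scaler/Interesting Array.py | solve
-- ===== SOURCE A (Python) =====
-- def solve(A):
--     count = 0
--     for a in A:
--         if a & 1:
--             count += 1
--     if count & 1:
--         return 'No'
--     return 'Yes'
-- ===== SOURCE B (Python) =====
-- def solve(A):
--     return 'No' if sum(A) & 1 else 'Yes'
-- ===== Notes on version B (the rewrite author's own statement) =====
-- stated objective: simpler
-- what changed: B replaces the per-element oddness branch and odd-counter with a single built-in sum of all elements, using that the parity of the count of odd elements equals the parity of the total sum.
import Mathlib
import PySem

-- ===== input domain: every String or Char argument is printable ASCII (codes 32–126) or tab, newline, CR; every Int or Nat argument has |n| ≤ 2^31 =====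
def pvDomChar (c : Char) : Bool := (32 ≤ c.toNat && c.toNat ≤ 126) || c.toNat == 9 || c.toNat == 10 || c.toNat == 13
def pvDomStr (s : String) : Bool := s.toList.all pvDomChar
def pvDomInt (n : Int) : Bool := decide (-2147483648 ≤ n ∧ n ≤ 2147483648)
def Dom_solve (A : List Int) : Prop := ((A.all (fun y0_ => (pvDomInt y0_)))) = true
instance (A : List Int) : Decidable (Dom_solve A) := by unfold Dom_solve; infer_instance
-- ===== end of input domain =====

-- B sums all elements instead of counting odd ones: the parity of the count of odd
-- elements equals the parity of the total sum (simpler decomposition, same cost).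

-- ===== PORT A =====
-- for each a in A: a & 1 is a % 2 (Python floor-mod; nonzero iff a is odd), counter incremented
def solve (A : List Int) : String :=
  let count := A.foldl (fun count a => if a % 2 ≠ 0 then count + 1 else count) (0 : Int)
  if count % 2 ≠ 0 then "No" else "Yes"

-- ===== PORT B =====
def solve_alt (A : List Int) : String :=
  if (A.foldl (· + ·) (0 : Int)) % 2 ≠ 0 then "No" else "Yes"

-- ===== PRECONDITION & SPEC =====
def Spec_solve (A : List Int) (out : String) : Prop := out = solve_alt A
instance (A : List Int) (out : String) : Decidable (Spec_solve A out) := by unfold Spec_solve; infer_instance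

-- ===== CLAIM (what is proved, stated in full; the proofs are below) =====
def Claim_equal_solve : Prop := ∀ (A : List Int), Dom_solve A → Spec_solve A (solve A)

-- ===== LEMMAS AND PROOFS =====

-- parity invariant: the odd-counter and the running sum keep equal parity
theorem pv_parity (A : List Int) :
    ∀ (c s : Int), c % 2 = s % 2 →
      (A.foldl (fun count a => if a % 2 ≠ 0 then count + 1 else count) c) % 2
        = (A.foldl (· + ·) s) % 2 := by
  induction A with
  | nil => intro c s h; simpa using h
  | cons a t ih =>
    intro c s h
    simp only [List.foldl_cons]
    apply ih
    by_cases hodd : a % 2 = 0 <;> simp [hodd] <;> omega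

-- ===== VERDICT (by name: the statement is the Claim_ definition above) =====
theorem solve_spec : Claim_equal_solve := by
  intro A _
  show solve A = solve_alt A
  simp only [solve, solve_alt]
  rw [pv_parity A 0 0 rfl]
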